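-- pv_equiv track=rewrite | github.com/nicky-eng/Escuelita_Gabo_Lato | Ej_6_2.py | epacios_por_separador
-- ===== SOURCE A (Python) =====
-- def epacios_por_separador(cadena, separador):
--     """Reemplaza todos los espacios dentro de la cadena por el separador."""
--     nueva_cadena = ''
--     for i in cadena:
--         if i == ' ':
--             nueva_cadena = nueva_cadena + separador
--         else:
--             nueva_cadena = nueva_cadena + i
--
--     return nueva_cadena
-- ===== SOURCE B (Python) =====
-- def epacios_por_separador(cadena, separador):
--     """Reemplaza todos los espacios dentro de la cadena por el separador."""
--     return separador.join(cadena.split(' '))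
-- ===== Notes on version B (the rewrite author's own statement) =====
-- stated objective: idiomatic
-- what changed: Replaces the character-by-character accumulator loop (per-character branch and string concatenation) with a single split-on-space / join-with-separator pipeline over the list of segments.
import Mathlib
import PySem

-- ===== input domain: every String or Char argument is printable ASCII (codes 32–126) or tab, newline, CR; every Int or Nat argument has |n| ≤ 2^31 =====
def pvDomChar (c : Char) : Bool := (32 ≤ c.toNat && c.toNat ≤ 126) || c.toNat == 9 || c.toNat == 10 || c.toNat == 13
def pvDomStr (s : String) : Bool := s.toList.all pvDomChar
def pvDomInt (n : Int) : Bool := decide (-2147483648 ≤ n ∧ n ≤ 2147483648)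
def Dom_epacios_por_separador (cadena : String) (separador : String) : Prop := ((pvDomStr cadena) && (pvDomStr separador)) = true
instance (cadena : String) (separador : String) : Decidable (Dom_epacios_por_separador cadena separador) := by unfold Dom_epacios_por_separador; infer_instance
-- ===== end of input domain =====

-- B replaces A's character-by-character accumulator loop with the idiomatic split-on-' '/join-with-separator pipeline (return value only; no side effects involved).

-- ===== PORT A =====
-- literal port of A's loop: scan the characters, appending either the separator or the character
def epacios_por_separador (cadena : String) (separador : String) : String :=
  String.ofList
    (cadena.toList.foldl
      (fun nueva_cadena i =>
        if i = ' ' then nueva_cadena ++ separador.toList else nueva_cadena ++ [i])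
      [])

-- ===== PORT B =====
-- cadena.split(' ') with the nonempty literal separator ' ' is PySem.Chars.splitOn; then separador.join(...)
def epacios_por_separador_alt (cadena : String) (separador : String) : String :=
  PySem.Str.join separador (List.map String.ofList (PySem.Chars.splitOn cadena.toList [' ']))

-- ===== PRECONDITION & SPEC =====
def Spec_epacios_por_separador (cadena : String) (separador : String) (out : String) : Prop := out = epacios_por_separador_alt cadena separador
instance (cadena : String) (separador : String) (out : String) : Decidable (Spec_epacios_por_separador cadena separador out) := by unfold Spec_epacios_por_separador; infer_instance

-- ===== CLAIM (what is proved, stated in full; the proofs are below) =====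
def Claim_equal_epacios_por_separador : Prop := ∀ (cadena : String) (separador : String), Dom_epacios_por_separador cadena separador → Spec_epacios_por_separador cadena separador (epacios_por_separador cadena separador)

-- ===== LEMMAS AND PROOFS =====

-- simple structural characterisation of splitting on the single character ' '
def splitSp : List Char → List Char → List (List Char)
  | [], cur => [cur.reverse]
  | c :: rest, cur => if c = ' ' then cur.reverse :: splitSp rest [] else splitSp rest (c :: cur)

theorem splitSp_ne_nil (cs cur : List Char) : splitSp cs cur ≠ [] := by
  induction cs generalizing cur with
  | nil => simp [splitSp]
  | cons c rest ih => by_cases h : c = ' ' <;> simp [splitSp, h, ih]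

theorem go_nil (fuel : Nat) (cur : List Char) (acc : List (List Char)) :
    PySem.Chars.splitOn.go [' '] fuel [] cur acc = (cur.reverse :: acc).reverse := by
  cases fuel <;> simp [PySem.Chars.splitOn.go]

theorem go_cons (n : Nat) (c : Char) (rest cur : List Char) (acc : List (List Char)) :
    PySem.Chars.splitOn.go [' '] (n + 1) (c :: rest) cur acc =
      if c = ' ' then PySem.Chars.splitOn.go [' '] n rest [] (cur.reverse :: acc)
      else PySem.Chars.splitOn.go [' '] n rest (c :: cur) acc := by
  rw [PySem.Chars.splitOn.go]
  by_cases h : c = ' '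
  · subst h; simp [List.isPrefixOf]
  · simp only [List.isPrefixOf]
    simp
    rw [if_neg (fun h2 : ' ' = c => absurd h2.symm h), if_neg h]

theorem go_eq_splitSp (fuel : Nat) (cs cur : List Char) (acc : List (List Char))
    (h : cs.length ≤ fuel) :
    PySem.Chars.splitOn.go [' '] fuel cs cur acc = acc.reverse ++ splitSp cs cur := by
  induction fuel generalizing cs cur acc with
  | zero =>
    have : cs = [] := List.length_eq_zero_iff.mp (Nat.le_zero.mp h)
    subst this; simp [go_nil, splitSp]
  | succ n ih =>
    cases cs with
    | nil => simp [go_nil, splitSp]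
    | cons c rest =>
      have hr : rest.length ≤ n := by simpa using h
      rw [go_cons]
      by_cases hc : c = ' ' <;> simp [hc, splitSp, ih _ _ _ hr]

theorem splitOn_space (cs : List Char) : PySem.Chars.splitOn cs [' '] = splitSp cs [] := by
  unfold PySem.Chars.splitOn
  simpa using go_eq_splitSp (cs.length + 1) cs [] [] (by omega)

theorem foldl_step_acc (sep : List Char) (cs : List Char) (acc : List Char) :
    cs.foldl (fun a i => if i = ' ' then a ++ sep else a ++ [i]) acc =
      acc ++ cs.foldl (fun a i => if i = ' ' then a ++ sep else a ++ [i]) [] := by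
  induction cs generalizing acc with
  | nil => simp
  | cons c rest ih =>
    simp only [List.foldl_cons, List.nil_append]
    by_cases h : c = ' '
    · rw [if_pos h, if_pos h, ih (acc ++ sep), ih sep]
      simp
    · rw [if_neg h, if_neg h, ih (acc ++ [c]), ih [c]]
      simp

theorem join_splitSp (sep : List Char) (cs cur : List Char) :
    PySem.Chars.join sep (splitSp cs cur) =
      cur.reverse ++ cs.foldl (fun a i => if i = ' ' then a ++ sep else a ++ [i]) [] := by
  induction cs generalizing cur with
  | nil => simp [splitSp, PySem.Chars.join_singleton]
  | cons c rest ih =>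
    by_cases h : c = ' '
    · have hne := splitSp_ne_nil rest []
      simp only [splitSp, List.foldl_cons, List.nil_append]
      rw [if_pos h, if_pos h]
      cases hsp : splitSp rest [] with
      | nil => exact absurd hsp hne
      | cons p ps =>
        rw [PySem.Chars.join_cons_cons, ← hsp, ih]
        rw [foldl_step_acc sep rest sep]
        simp
    · simp only [splitSp, List.foldl_cons, List.nil_append]
      rw [if_neg h, if_neg h, ih (c :: cur), foldl_step_acc sep rest [c]]
      simp

theorem toList_map_ofList (l : List (List Char)) :
    List.map String.toList (List.map String.ofList l) = l := by
  simp [Function.comp_def]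

-- ===== VERDICT (by name: the statement is the Claim_ definition above) =====
theorem epacios_por_separador_spec : Claim_equal_epacios_por_separador := by
  intro cadena separador _
  unfold Spec_epacios_por_separador epacios_por_separador epacios_por_separador_alt
  apply String.toList_injective
  rw [PySem.Str.toList_join, toList_map_ofList, splitOn_space, join_splitSp]
  simp
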